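-- pv_equiv track=rewrite | github.com/KovalDenys1/life-bot-public | services/github_service.py | sanitize_tables
-- ===== SOURCE A (Python) =====
-- def sanitize_tables(content: str) -> str:
--     """Remove blank lines inside markdown tables to prevent broken rendering in Obsidian."""
--     lines = content.splitlines()
--     result = []
--     for i, line in enumerate(lines):
--         if not line.strip():
--             prev = result[-1].strip() if result else ''
--             nxt = lines[i + 1].strip() if i + 1 < len(lines) else ''
--             if prev.startswith('|') and nxt.startswith('|'):
--                 continue
--         result.append(line)
--     return '\n'.join(result)
-- ===== SOURCE B (Python) =====
-- def sanitize_tables(content: str) -> str: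
--     """Remove blank lines inside markdown tables to prevent broken rendering in Obsidian."""
--     lines = content.splitlines()
--     n = len(lines)
--     drop = {
--         i
--         for i, line in enumerate(lines)
--         if not line.strip()
--         and i > 0
--         and lines[i - 1].strip().startswith('|')
--         and i + 1 < n
--         and lines[i + 1].strip().startswith('|')
--     }
--     return '\n'.join(line for i, line in enumerate(lines) if i not in drop)
-- ===== Notes on version B (the rewrite author's own statement) =====
-- stated objective: alternative
-- what changed: Replaces A's conditional-append accumulator (which consults the last kept line result[-1]) with two independent passes: first compute the index set of removable blanks from the raw lines (lookbehind lines[i-1], valid because a removable blank can never follow a removed blank), then rebuild the text with one filtering comprehension.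
import Mathlib
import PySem

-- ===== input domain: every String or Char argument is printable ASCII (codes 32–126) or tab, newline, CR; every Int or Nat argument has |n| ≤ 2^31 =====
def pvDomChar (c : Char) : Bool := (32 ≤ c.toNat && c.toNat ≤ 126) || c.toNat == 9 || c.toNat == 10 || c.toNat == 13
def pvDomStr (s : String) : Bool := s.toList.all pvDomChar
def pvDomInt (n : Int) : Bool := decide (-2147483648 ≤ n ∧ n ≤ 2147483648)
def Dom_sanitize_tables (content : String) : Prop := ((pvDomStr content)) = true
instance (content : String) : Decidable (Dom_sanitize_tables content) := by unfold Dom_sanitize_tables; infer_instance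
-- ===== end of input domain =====

-- B computes the removable-blank index set from the raw lines first and then filters in a second pass,
-- instead of A's single conditional-append accumulator; alternative decomposition, same O(n) cost.

-- ===== PORT A =====
-- body of A's `for i, line in enumerate(lines)` loop, acting on the accumulator `result`
def sanitizeStep (lines : List String) (result : List String) (il : Int × String) : List String :=
  if PySem.Str.strip il.2 == "" then
    let prev := match result.getLast? with
      | some l => PySem.Str.strip l
      | none => ""
    let nxt := if il.1 + 1 < (lines.length : Int) then
        PySem.Str.strip (PySem.List.pyGetD lines (il.1 + 1) "") else ""
    if PySem.Str.startswith prev "|" && PySem.Str.startswith nxt "|" then result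
    else result ++ [il.2]
  else result ++ [il.2]

def sanitize_tables (content : String) : String :=
  let lines := PySem.Str.splitlines content
  PySem.Str.join "\n" ((PySem.List.enumerate lines).foldl (sanitizeStep lines) [])

-- ===== PORT B =====
-- the set comprehension of Source B: indices of blank lines flanked by table rows
def altDropList (lines : List String) : List Int :=
  (PySem.List.enumerate lines).filterMap (fun il =>
    if PySem.Str.strip il.2 == "" &&
       decide (0 < il.1) &&
       PySem.Str.startswith (PySem.Str.strip (PySem.List.pyGetD lines (il.1 - 1) "")) "|" &&
       decide (il.1 + 1 < (lines.length : Int)) &&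
       PySem.Str.startswith (PySem.Str.strip (PySem.List.pyGetD lines (il.1 + 1) "")) "|"
    then some il.1 else none)

def sanitize_tables_alt (content : String) : String :=
  let lines := PySem.Str.splitlines content
  let drop : PySem.Set Int := PySem.Set.ofList (altDropList lines)
  PySem.Str.join "\n" ((PySem.List.enumerate lines).filterMap (fun il =>
    if PySem.Set.contains drop il.1 then none else some il.2))

-- ===== PRECONDITION & SPEC =====
def Spec_sanitize_tables (content : String) (out : String) : Prop := out = sanitize_tables_alt content
instance (content : String) (out : String) : Decidable (Spec_sanitize_tables content out) := by unfold Spec_sanitize_tables; infer_instance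

-- ===== CLAIM (what is proved, stated in full; the proofs are below) =====
def Claim_equal_sanitize_tables : Prop := ∀ (content : String), Dom_sanitize_tables content → Spec_sanitize_tables content (sanitize_tables content)

-- ===== LEMMAS AND PROOFS =====

def pvLine (lines : List String) (j : Nat) : String := lines.getD j ""

def pvPipe (lines : List String) (j : Nat) : Bool :=
  PySem.Str.startswith (PySem.Str.strip (pvLine lines j)) "|"

-- the indices B's set comprehension collects, as a Nat predicate
def pvDrop (lines : List String) (j : Nat) : Bool :=
  (PySem.Str.strip (pvLine lines j) == "") && decide (0 < j) && pvPipe lines (j - 1)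
    && decide (j + 1 < lines.length) && pvPipe lines (j + 1)

-- the lines kept among the first k, in order
def pvKept (lines : List String) (k : Nat) : List String :=
  (List.range k).filterMap (fun j => if pvDrop lines j then none else some (pvLine lines j))

lemma pvKept_succ (lines : List String) (k : Nat) :
    pvKept lines (k + 1) = pvKept lines k ++ (if pvDrop lines k then [] else [pvLine lines k]) := by
  by_cases h : pvDrop lines k = true <;> simp [pvKept, List.range_succ, h]

lemma pvDrop_false_of_blank_succ (lines : List String) (j : Nat)
    (hb : (PySem.Str.strip (pvLine lines (j + 1)) == "") = true) :
    pvDrop lines j = false := by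
  have hp : pvPipe lines (j + 1) = false := by
    simp only [beq_iff_eq] at hb
    simp only [pvPipe, hb]
    decide
  simp [pvDrop, hp]

lemma getLast_pvKept (lines : List String) (k : Nat)
    (hb : (PySem.Str.strip (pvLine lines k) == "") = true) :
    (pvKept lines k).getLast? = match k with | 0 => none | j + 1 => some (pvLine lines j) := by
  cases k with
  | zero => simp [pvKept]
  | succ j =>
    rw [pvKept_succ, pvDrop_false_of_blank_succ lines j hb]
    simp

-- the loop body sends the kept-prefix state to the next kept-prefix state
lemma sanitizeStep_kept (lines : List String) (k : Nat) (hk : k < lines.length) :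
    sanitizeStep lines (pvKept lines k) ((k : Int), pvLine lines k) = pvKept lines (k + 1) := by
  have hsw : PySem.Str.startswith (PySem.Str.strip "") "|" = false := by decide
  rw [pvKept_succ]
  by_cases hb : (PySem.Str.strip (pvLine lines k) == "") = true
  · have hnxt : PySem.Str.startswith
        (if (k : Int) + 1 < (lines.length : Int) then
          PySem.Str.strip (PySem.List.pyGetD lines ((k : Int) + 1) "") else "") "|"
        = (decide (k + 1 < lines.length) && pvPipe lines (k + 1)) := by
      by_cases h : k + 1 < lines.length
      · have h' : ((k : Int) + 1 < (lines.length : Int)) := by exact_mod_cast h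
        have hc : ((k : Int) + 1) = ((k + 1 : Nat) : Int) := by push_cast; ring
        rw [if_pos h', hc, PySem.List.pyGetD_natCast]
        simp [h, pvPipe, pvLine]
      · have h' : ¬ ((k : Int) + 1 < (lines.length : Int)) := fun hc => h (by exact_mod_cast hc)
        rw [if_neg h']
        simpa [h] using hsw
    cases k with
    | zero =>
      have hd : pvDrop lines 0 = false := by simp [pvDrop]
      simp only [sanitizeStep, hb, if_true, getLast_pvKept lines 0 hb, hnxt, hd]
      simp only [Nat.cast_zero] at *
      simp
      intro h
      exact absurd h (by decide)
    | succ j =>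
      have hd : pvDrop lines (j + 1)
          = (pvPipe lines j && (decide (j + 1 + 1 < lines.length) && pvPipe lines (j + 1 + 1))) := by
        simp [pvDrop, hb, Bool.and_assoc]
      simp only [sanitizeStep, hb, if_true, getLast_pvKept lines (j + 1) hb, hnxt, hd]
      simp only [pvPipe, Bool.and_eq_true, decide_eq_true_eq]
      split <;> simp
  · simp only [Bool.not_eq_true] at hb
    have hd : pvDrop lines k = false := by simp [pvDrop, hb]
    simp [sanitizeStep, hb, hd]

lemma pvLine_eq (lines : List String) (k : Nat) (hk : k < lines.length) :
    lines[k] = pvLine lines k := by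
  simp [pvLine, List.getD_eq_getElem?_getD, List.getElem?_eq_getElem hk]

-- A's fold, from any suffix
lemma foldA (lines : List String) : ∀ (n k : Nat), lines.length - k = n → k ≤ lines.length →
    (PySem.List.enumerate (lines.drop k) (k : Int)).foldl (sanitizeStep lines) (pvKept lines k)
      = pvKept lines lines.length := by
  intro n
  induction n with
  | zero =>
    intro k h1 h2
    have hk : k = lines.length := by omega
    subst hk
    simp [List.drop_length]
  | succ m ih =>
    intro k h1 h2
    have hk : k < lines.length := by omega
    rw [List.drop_eq_getElem_cons hk, PySem.List.enumerate_cons, List.foldl_cons,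
        pvLine_eq lines k hk, sanitizeStep_kept lines k hk]
    have hc : ((k : Int) + 1) = ((k + 1 : Nat) : Int) := by push_cast; ring
    rw [hc]
    exact ih (k + 1) (by omega) (by omega)

-- the Int-valued condition of Source B's comprehension at index j equals pvDrop
lemma cond_enum (lines : List String) (j : Nat) (hj : j < lines.length) :
    (PySem.Str.strip (lines[j]) == "" &&
      decide (0 < (j : Int)) &&
      PySem.Str.startswith (PySem.Str.strip (PySem.List.pyGetD lines ((j : Int) - 1) "")) "|" &&
      decide ((j : Int) + 1 < (lines.length : Int)) &&
      PySem.Str.startswith (PySem.Str.strip (PySem.List.pyGetD lines ((j : Int) + 1) "")) "|")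
    = pvDrop lines j := by
  rw [pvLine_eq lines j hj]
  cases j with
  | zero =>
    simp [pvDrop]
  | succ i =>
    have h1 : ((i + 1 : Nat) : Int) - 1 = ((i : Nat) : Int) := by push_cast; ring
    have h2 : ((i + 1 : Nat) : Int) + 1 = ((i + 1 + 1 : Nat) : Int) := by push_cast; ring
    rw [h1, h2, PySem.List.pyGetD_natCast, PySem.List.pyGetD_natCast]
    simp only [pvDrop, pvPipe, pvLine, List.getD_eq_getElem?_getD, Nat.cast_lt, Int.natCast_pos,
      Nat.add_sub_cancel]

lemma contains_altDropList (lines : List String) (j : Nat) (hj : j < lines.length) :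
    PySem.Set.contains (PySem.Set.ofList (altDropList lines)) ((j : Int)) = pvDrop lines j := by
  by_cases hd : pvDrop lines j = true
  · rw [hd, PySem.Set.contains_iff]
    rw [PySem.Set.mem_ofList]
    simp only [altDropList, List.mem_filterMap]
    refine ⟨((j : Int), lines[j]), ?_, ?_⟩
    · rw [PySem.List.mem_enumerate_iff]
      exact ⟨j, hj, by simp⟩
    · simp only [cond_enum lines j hj, hd, if_true]
  · rw [Bool.not_eq_true] at hd
    rw [hd]
    have hnm : ¬ ((j : Int) ∈ PySem.Set.ofList (altDropList lines)) := by
      rw [PySem.Set.mem_ofList]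
      intro hmem
      simp only [altDropList, List.mem_filterMap] at hmem
      obtain ⟨il, hmem, hsome⟩ := hmem
      rw [PySem.List.mem_enumerate_iff] at hmem
      obtain ⟨m, hm, hil⟩ := hmem
      subst hil
      simp only [zero_add] at hsome
      split at hsome
      · rename_i hcnd
        have hjm : j = m := by
          have := congrArg (fun o => o.getD 0) hsome
          simp at this
          exact_mod_cast this.symm
        subst hjm
        rw [cond_enum lines j hm, hd] at hcnd
        exact Bool.false_ne_true hcnd
      · simp at hsome
    cases hcc : PySem.Set.contains (PySem.Set.ofList (altDropList lines)) ((j : Int)) with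
    | false => rfl
    | true => exact absurd ((PySem.Set.contains_iff _ _).mp hcc) hnm

-- B's filtered pass, from any suffix
lemma foldB (lines : List String) : ∀ (n k : Nat), lines.length - k = n → k ≤ lines.length →
    pvKept lines k ++ (PySem.List.enumerate (lines.drop k) (k : Int)).filterMap
      (fun il => if PySem.Set.contains (PySem.Set.ofList (altDropList lines)) il.1 then none else some il.2)
    = pvKept lines lines.length := by
  intro n
  induction n with
  | zero =>
    intro k h1 h2
    have hk : k = lines.length := by omega
    subst hk
    simp [List.drop_length]
  | succ m ih =>
    intro k h1 h2
    have hk : k < lines.length := by omega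
    rw [List.drop_eq_getElem_cons hk, PySem.List.enumerate_cons, List.filterMap_cons]
    have hc : ((k : Int) + 1) = ((k + 1 : Nat) : Int) := by push_cast; ring
    rw [hc]
    simp only [contains_altDropList lines k hk]
    by_cases hd : pvDrop lines k = true
    · have hkk : pvKept lines k = pvKept lines (k + 1) := by rw [pvKept_succ, hd]; simp
      simp only [hd, if_true]
      rw [hkk]
      exact ih (k + 1) (by omega) (by omega)
    · rw [Bool.not_eq_true] at hd
      have hkk : pvKept lines (k + 1) = pvKept lines k ++ [pvLine lines k] := by
        rw [pvKept_succ, hd]; simp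
      simp only [hd, Bool.false_eq_true, if_false]
      rw [pvLine_eq lines k hk, ← List.singleton_append, ← List.append_assoc, ← hkk]
      exact ih (k + 1) (by omega) (by omega)

-- ===== VERDICT (by name: the statement is the Claim_ definition above) =====
theorem sanitize_tables_spec : Claim_equal_sanitize_tables := by
  intro content _
  unfold Spec_sanitize_tables sanitize_tables sanitize_tables_alt
  set lines := PySem.Str.splitlines content with hl
  have hA : (PySem.List.enumerate lines).foldl (sanitizeStep lines) []
      = pvKept lines lines.length := by
    have := foldA lines lines.length 0 (by omega) (by omega)
    simpa [pvKept] using this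
  have hB : (PySem.List.enumerate lines).filterMap
      (fun il => if PySem.Set.contains (PySem.Set.ofList (altDropList lines)) il.1 then none else some il.2)
      = pvKept lines lines.length := by
    have := foldB lines lines.length 0 (by omega) (by omega)
    simpa [pvKept] using this
  simp only [hA, hB]
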